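-- pv_equiv track=rewrite | github.com/k-harada/AtCoder | ABC/ABC1XX/ABC196/E.py | solve
-- ===== SOURCE A (Python) =====
-- def solve(n, at_list, q, x_list):
--     left = -10 ** 10
--     right = 10 ** 10
--     add_sum = 0
--     break_flag = False
--     for a, t in at_list:
--         if not break_flag:
--             if t == 1:
--                 add_sum += a
--             elif t == 2:
--                 left_now = a - add_sum
--                 left = max(left_now, left)
--             else:
--                 right_now = a - add_sum
--                 right = min(right_now, right)
--             if left > right:
--                 break_flag = True
--                 add_sum = a
--         else:
--             if t == 1:
--                 add_sum += a
--             elif t == 2: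
--                 add_sum = max(a, add_sum)
--             else:
--                 add_sum = min(a, add_sum)
--
--     res_list = []
--     for x in x_list:
--
--         if not break_flag:
--             if x <= left:
--                 res_list.append(left + add_sum)
--             elif x >= right:
--                 res_list.append(right + add_sum)
--             else:
--                 res_list.append(x + add_sum)
--         else:
--             res_list.append(add_sum)
--     return res_list
-- ===== SOURCE B (Python) =====
-- def solve(n, at_list, q, x_list):
--     low, high, s = -10 ** 10, 10 ** 10, 0
--     for a, t in at_list:
--         if t == 1:
--             s += a
--             low += a
--             high += a
--         elif t == 2:
--             low = max(low, a)
--             high = max(high, a)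
--         else:
--             low = min(low, a)
--             high = min(high, a)
--     return [min(max(x + s, low), high) for x in x_list]
-- ===== Notes on version B (the rewrite author's own statement) =====
-- stated objective: simpler
-- what changed: B keeps the clamp window as three absolute scalars (low, high, shift) and answers each query with min(max(x+s,low),high), dropping A's break_flag, relative coordinates and the collapsed-window special case entirely.
import Mathlib
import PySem

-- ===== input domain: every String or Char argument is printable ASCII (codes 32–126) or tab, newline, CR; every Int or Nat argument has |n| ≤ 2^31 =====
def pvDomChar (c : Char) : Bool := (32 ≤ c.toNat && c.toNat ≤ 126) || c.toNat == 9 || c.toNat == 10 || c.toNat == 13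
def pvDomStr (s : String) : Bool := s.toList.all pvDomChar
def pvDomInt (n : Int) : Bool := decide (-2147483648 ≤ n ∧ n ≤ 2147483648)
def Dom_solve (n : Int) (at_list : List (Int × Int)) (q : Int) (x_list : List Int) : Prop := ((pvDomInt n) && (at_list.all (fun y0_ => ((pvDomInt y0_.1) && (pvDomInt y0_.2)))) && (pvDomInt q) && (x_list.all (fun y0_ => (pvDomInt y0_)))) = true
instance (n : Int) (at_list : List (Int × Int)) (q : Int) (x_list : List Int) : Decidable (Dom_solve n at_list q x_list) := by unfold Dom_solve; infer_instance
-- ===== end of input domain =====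

-- B maintains the clamp window in absolute coordinates (low, high, shift), with no
-- break flag and no relative coordinates; objective: simpler.

-- ===== PORT A =====
-- state = (left, right, add_sum, break_flag), exactly A's loop body
def solveStepA (st : Int × Int × Int × Bool) (at_ : Int × Int) : Int × Int × Int × Bool :=
  let (left, right, add_sum, bf) := st
  let (a, t) := at_
  if !bf then
    let (left, right, add_sum) :=
      if t == 1 then (left, right, add_sum + a)
      else if t == 2 then (max (a - add_sum) left, right, add_sum)
      else (left, min (a - add_sum) right, add_sum)
    if left > right then (left, right, a, true) else (left, right, add_sum, false)
  else
    if t == 1 then (left, right, add_sum + a, true)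
    else if t == 2 then (left, right, max a add_sum, true)
    else (left, right, min a add_sum, true)

def solve (n : Int) (at_list : List (Int × Int)) (q : Int) (x_list : List Int) : List Int :=
  let st := at_list.foldl solveStepA (-10 ^ 10, 10 ^ 10, 0, false)
  let (left, right, add_sum, bf) := st
  x_list.foldl (fun res_list x =>
    res_list ++ [if !bf then
                   if x ≤ left then left + add_sum
                   else if x ≥ right then right + add_sum
                   else x + add_sum
                 else add_sum]) []

-- ===== PORT B =====
-- state = (low, high, s)
def solveStepB (st : Int × Int × Int) (at_ : Int × Int) : Int × Int × Int :=
  let (low, high, s) := st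
  let (a, t) := at_
  if t == 1 then (low + a, high + a, s + a)
  else if t == 2 then (max low a, max high a, s)
  else (min low a, min high a, s)

def solve_alt (n : Int) (at_list : List (Int × Int)) (q : Int) (x_list : List Int) : List Int :=
  let st := at_list.foldl solveStepB (-10 ^ 10, 10 ^ 10, 0)
  let (low, high, s) := st
  x_list.map (fun x => min (max (x + s) low) high)

-- ===== PRECONDITION & SPEC =====
def Spec_solve (n : Int) (at_list : List (Int × Int)) (q : Int) (x_list : List Int) (out : List Int) : Prop := out = solve_alt n at_list q x_list
instance (n : Int) (at_list : List (Int × Int)) (q : Int) (x_list : List Int) (out : List Int) : Decidable (Spec_solve n at_list q x_list out) := by unfold Spec_solve; infer_instance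

-- ===== CLAIM (what is proved, stated in full; the proofs are below) =====
def Claim_equal_solve : Prop := ∀ (n : Int) (at_list : List (Int × Int)) (q : Int) (x_list : List Int), Dom_solve n at_list q x_list → Spec_solve n at_list q x_list (solve n at_list q x_list)

-- ===== LEMMAS AND PROOFS =====

-- The simulation invariant between A's state and B's state.
def solveInv (sa : Int × Int × Int × Bool) (sb : Int × Int × Int) : Prop :=
  if sa.2.2.2 then sb.1 = sa.2.2.1 ∧ sb.2.1 = sa.2.2.1
  else sb.1 = sa.1 + sa.2.2.1 ∧ sb.2.1 = sa.2.1 + sa.2.2.1 ∧ sb.2.2 = sa.2.2.1 ∧ sa.1 ≤ sa.2.1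

theorem solveInv_step (sa : Int × Int × Int × Bool) (sb : Int × Int × Int) (p : Int × Int)
    (h : solveInv sa sb) : solveInv (solveStepA sa p) (solveStepB sb p) := by
  obtain ⟨left, right, add_sum, bf⟩ := sa
  obtain ⟨low, high, s⟩ := sb
  obtain ⟨a, t⟩ := p
  cases bf <;> by_cases ht1 : t == 1 <;> by_cases ht2 : t == 2 <;>
    simp_all [solveInv, solveStepA, solveStepB] <;>
    first
      | (split_ifs <;> simp_all <;> omega)
      | simp [max_comm, min_comm]

theorem solveInv_foldl (l : List (Int × Int)) (sa : Int × Int × Int × Bool) (sb : Int × Int × Int)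
    (h : solveInv sa sb) : solveInv (l.foldl solveStepA sa) (l.foldl solveStepB sb) := by
  induction l generalizing sa sb with
  | nil => exact h
  | cons p l ih => exact ih _ _ (solveInv_step sa sb p h)

theorem solve_answer (sa : Int × Int × Int × Bool) (sb : Int × Int × Int)
    (h : solveInv sa sb) (x : Int) :
    (if !sa.2.2.2 then
       if x ≤ sa.1 then sa.1 + sa.2.2.1
       else if x ≥ sa.2.1 then sa.2.1 + sa.2.2.1
       else x + sa.2.2.1
     else sa.2.2.1) = min (max (x + sb.2.2) sb.1) sb.2.1 := by
  obtain ⟨left, right, add_sum, bf⟩ := sa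
  obtain ⟨low, high, s⟩ := sb
  cases bf <;> simp [solveInv] at h ⊢
  · obtain ⟨h1, h2, h3, h4⟩ := h
    split_ifs <;> omega
  · omega

theorem foldl_append_map (l : List Int) (f : Int → Int) (acc : List Int) :
    l.foldl (fun res x => res ++ [f x]) acc = acc ++ l.map f := by
  induction l generalizing acc with
  | nil => simp
  | cons x l ih => simp [ih]

-- ===== VERDICT (by name: the statement is the Claim_ definition above) =====
theorem solve_spec : Claim_equal_solve := by
  intro n at_list q x_list _
  unfold Spec_solve solve solve_alt
  have hinv : solveInv (at_list.foldl solveStepA (-10 ^ 10, 10 ^ 10, 0, false))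
      (at_list.foldl solveStepB (-10 ^ 10, 10 ^ 10, 0)) := by
    apply solveInv_foldl
    norm_num [solveInv]
  rcases hA : at_list.foldl solveStepA (-10 ^ 10, 10 ^ 10, 0, false) with ⟨left, right, add_sum, bf⟩
  rcases hB : at_list.foldl solveStepB (-10 ^ 10, 10 ^ 10, 0) with ⟨low, high, s⟩
  rw [hA, hB] at hinv
  dsimp only
  rw [foldl_append_map, List.nil_append]
  apply List.map_congr_left
  intro x _
  exact solve_answer (left, right, add_sum, bf) (low, high, s) hinv x
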